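-- pv_equiv track=rewrite | github.com/Eventual-Inc/Daft | tools/convert_doctest_to_markdown.py | fix_double_empty_lines_in_code_blocks
-- ===== SOURCE A (Python) =====
-- def fix_double_empty_lines_in_code_blocks(content: str) -> str:
--     """Fix double empty lines within Python code blocks.
--
--     Args:
--         content: The file content as a string
--
--     Returns:
--         The content with double empty lines fixed
--     """
--     lines = content.split("\n")
--     result = []
--     in_code_block = False
--     i = 0
--
--     while i < len(lines):
--         line = lines[i]
--
--         # Check if we're entering a Python code block
--         if line.strip().endswith("```python"):
--             in_code_block = True
--             result.append(line)
--             i += 1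
--             continue
--
--         # Check if we're exiting a code block
--         if in_code_block and line.strip().startswith("```"):
--             in_code_block = False
--             result.append(line)
--             i += 1
--             continue
--
--         # If we're in a code block, check for consecutive empty lines
--         if in_code_block:
--             # Add the current line
--             result.append(line)
--
--             # If this line is empty, skip any additional consecutive empty lines
--             if line.strip() == "":
--                 # Look ahead and skip consecutive empty lines
--                 j = i + 1
--                 while j < len(lines) and lines[j].strip() == "" and not lines[j].strip().startswith("```"):
--                     j += 1
--                 # Move i to just before the next non-empty line (or end of consecutive empties)
--                 i = j - 1
--         else:
--             result.append(line)
--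
--         i += 1
--
--     return "\n".join(result)
-- ===== SOURCE B (Python) =====
-- def fix_double_empty_lines_in_code_blocks(content: str) -> str:
--     """Collapse consecutive empty lines inside ```python code blocks (single forward pass)."""
--     out = []
--     in_code = False
--     prev_empty = False
--     for line in content.split("\n"):
--         s = line.strip()
--         if s.endswith("```python"):
--             in_code = True
--             prev_empty = False
--             out.append(line)
--         elif in_code and s.startswith("```"):
--             in_code = False
--             out.append(line)
--         elif in_code:
--             if s == "":
--                 if not prev_empty:
--                     out.append(line)
--                 prev_empty = True
--             else:
--                 prev_empty = False
--                 out.append(line)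
--         else:
--             out.append(line)
--     return "\n".join(out)
-- ===== Notes on version B (the rewrite author's own statement) =====
-- stated objective: simpler
-- what changed: Replaces A's index-based while-loop with an inner look-ahead loop that skips runs of empty lines by a single forward pass over the lines carrying a prev_empty boolean flag.
import Mathlib
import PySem

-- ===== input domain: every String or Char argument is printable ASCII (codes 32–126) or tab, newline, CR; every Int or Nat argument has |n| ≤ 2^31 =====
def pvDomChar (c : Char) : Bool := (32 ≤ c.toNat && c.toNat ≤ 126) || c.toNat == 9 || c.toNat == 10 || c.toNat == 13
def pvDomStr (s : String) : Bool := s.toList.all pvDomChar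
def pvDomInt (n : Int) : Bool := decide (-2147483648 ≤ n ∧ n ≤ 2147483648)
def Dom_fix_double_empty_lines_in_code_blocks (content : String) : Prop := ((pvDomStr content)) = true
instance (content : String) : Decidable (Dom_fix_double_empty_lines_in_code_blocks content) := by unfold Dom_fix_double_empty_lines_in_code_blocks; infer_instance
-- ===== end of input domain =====

-- B replaces A's inner look-ahead while-loop by a single forward pass with a `prev_empty` flag
-- (objective: simpler decomposition, same cost).

-- ===== PORT A =====
-- inner look-ahead: `while j < len(lines) and lines[j].strip() == "" and not lines[j].strip().startswith("```")`
def pvASkip (lines : List String) (j : Nat) : Nat :=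
  if h : j < lines.length then
    if PySem.Str.strip lines[j] == "" && !(PySem.Str.startswith (PySem.Str.strip lines[j]) "```") then
      pvASkip lines (j + 1)
    else j
  else j
termination_by lines.length - j

theorem pvASkip_le (lines : List String) (j : Nat) : j ≤ pvASkip lines j := by
  unfold pvASkip
  split
  · split
    · exact le_trans (Nat.le_succ j) (pvASkip_le lines (j + 1))
    · exact le_refl j
  · exact le_refl j
termination_by lines.length - j

-- A's outer `while i < len(lines)` loop, state (i, in_code_block, result)
def pvALoop (lines : List String) (i : Nat) (inCode : Bool) (acc : List String) : List String :=
  if h : i < lines.length then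
    let line := lines[i]
    if PySem.Str.endswith (PySem.Str.strip line) "```python" then
      pvALoop lines (i + 1) true (acc ++ [line])
    else if inCode && PySem.Str.startswith (PySem.Str.strip line) "```" then
      pvALoop lines (i + 1) false (acc ++ [line])
    else if inCode then
      if PySem.Str.strip line == "" then
        -- `i = j - 1` followed by `i += 1` resumes at j = pvASkip lines (i+1)
        pvALoop lines (pvASkip lines (i + 1)) inCode (acc ++ [line])
      else
        pvALoop lines (i + 1) inCode (acc ++ [line])
    else
      pvALoop lines (i + 1) inCode (acc ++ [line])
  else acc
termination_by lines.length - i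
decreasing_by
  · omega
  · omega
  · have := pvASkip_le lines (i + 1); omega
  · omega
  · omega

def fix_double_empty_lines_in_code_blocks (content : String) : String :=
  -- content.split("\n")
  PySem.Str.join "\n" (pvALoop ((PySem.Chars.splitOn content.toList "\n".toList).map String.ofList) 0 false [])

-- ===== PORT B =====
-- single pass, state (in_code, prev_empty, out)
def pvBLoop : List String → Bool → Bool → List String → List String
  | [], _, _, acc => acc
  | line :: rest, inCode, prevEmpty, acc =>
    if PySem.Str.endswith (PySem.Str.strip line) "```python" then
      pvBLoop rest true false (acc ++ [line])
    else if inCode && PySem.Str.startswith (PySem.Str.strip line) "```" then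
      pvBLoop rest false prevEmpty (acc ++ [line])
    else if inCode then
      if PySem.Str.strip line == "" then
        if prevEmpty then pvBLoop rest true true acc
        else pvBLoop rest true true (acc ++ [line])
      else pvBLoop rest true false (acc ++ [line])
    else pvBLoop rest false prevEmpty (acc ++ [line])

def fix_double_empty_lines_in_code_blocks_alt (content : String) : String :=
  -- content.split("\n")
  PySem.Str.join "\n" (pvBLoop ((PySem.Chars.splitOn content.toList "\n".toList).map String.ofList) false false [])

-- ===== PRECONDITION & SPEC =====
def Spec_fix_double_empty_lines_in_code_blocks (content : String) (out : String) : Prop := out = fix_double_empty_lines_in_code_blocks_alt content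
instance (content : String) (out : String) : Decidable (Spec_fix_double_empty_lines_in_code_blocks content out) := by unfold Spec_fix_double_empty_lines_in_code_blocks; infer_instance

-- ===== CLAIM (what is proved, stated in full; the proofs are below) =====
def Claim_equal_fix_double_empty_lines_in_code_blocks : Prop := ∀ (content : String), Dom_fix_double_empty_lines_in_code_blocks content → Spec_fix_double_empty_lines_in_code_blocks content (fix_double_empty_lines_in_code_blocks content)

-- ===== LEMMAS AND PROOFS =====

-- with in_code = false the prev_empty flag is never consulted before being reset on block entry
theorem pvBLoop_flag_false (l : List String) (p q : Bool) (acc : List String) :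
    pvBLoop l false p acc = pvBLoop l false q acc := by
  induction l generalizing acc with
  | nil => rfl
  | cons line rest ih =>
    by_cases hEnter : PySem.Str.endswith (PySem.Str.strip line) "```python" = true
    · simp only [pvBLoop, if_pos hEnter]
    · simp only [pvBLoop, if_neg hEnter, Bool.false_and, Bool.false_eq_true, if_false]
      exact ih _

-- skipping A's run of consecutive empties equals B's prev_empty-guided skipping
theorem pvBLoop_skip (lines : List String) (j : Nat) (acc : List String) :
    pvBLoop (lines.drop j) true true acc
      = pvBLoop (lines.drop (pvASkip lines j)) true false acc := by
  by_cases h : j < lines.length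
  · rw [List.drop_eq_getElem_cons h]
    by_cases hEmpty : (PySem.Str.strip lines[j] == "") = true
    · have he : PySem.Str.strip lines[j] = "" := beq_iff_eq.mp hEmpty
      have hEnter : PySem.Str.endswith (PySem.Str.strip lines[j]) "```python" = false := by
        rw [he]; decide
      have hStart : PySem.Str.startswith (PySem.Str.strip lines[j]) "```" = false := by
        rw [he]; decide
      -- the line is skipped by A's look-ahead and by B's flag
      rw [pvASkip, dif_pos h, if_pos (by rw [hEmpty, hStart]; rfl)]
      simp only [pvBLoop, hEnter, Bool.false_eq_true, if_false, Bool.true_and, hStart,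
        if_pos hEmpty, if_true]
      exact pvBLoop_skip lines (j + 1) acc
    · -- non-empty stripped line: A's look-ahead stops; B's flag is no longer consulted
      rw [pvASkip, dif_pos h, if_neg (by rw [Bool.eq_false_iff.mpr hEmpty]; simp),
        List.drop_eq_getElem_cons h]
      by_cases hEnter : PySem.Str.endswith (PySem.Str.strip lines[j]) "```python" = true
      · simp only [pvBLoop, if_pos hEnter]
      · simp only [pvBLoop, if_neg hEnter, Bool.true_and]
        by_cases hStart : PySem.Str.startswith (PySem.Str.strip lines[j]) "```" = true
        · simp only [if_pos hStart]
          exact pvBLoop_flag_false _ _ _ _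
        · simp only [if_neg hStart, if_true, if_neg hEmpty]
  · rw [pvASkip, dif_neg h, List.drop_eq_nil_of_le (by omega)]
    rfl
termination_by lines.length - j

-- main invariant: A's index loop from i equals B's single pass over the suffix with a cleared flag
theorem pvLoop_eq (lines : List String) (i : Nat) (c : Bool) (acc : List String) :
    pvALoop lines i c acc = pvBLoop (lines.drop i) c false acc := by
  by_cases h : i < lines.length
  · rw [pvALoop, dif_pos h, List.drop_eq_getElem_cons h]
    by_cases hEnter : PySem.Str.endswith (PySem.Str.strip lines[i]) "```python" = true
    · simp only [pvBLoop, if_pos hEnter]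
      exact pvLoop_eq lines (i + 1) true _
    · simp only [pvBLoop, if_neg hEnter]
      cases c with
      | false =>
        simp only [Bool.false_and, Bool.false_eq_true, if_false]
        exact pvLoop_eq lines (i + 1) false _
      | true =>
        simp only [Bool.true_and]
        by_cases hStart : PySem.Str.startswith (PySem.Str.strip lines[i]) "```" = true
        · simp only [if_pos hStart]
          exact pvLoop_eq lines (i + 1) false _
        · simp only [if_neg hStart, if_true]
          by_cases hEmpty : (PySem.Str.strip lines[i] == "") = true
          · simp only [if_pos hEmpty, Bool.false_eq_true, if_false]
            rw [pvBLoop_skip lines (i + 1)]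
            exact pvLoop_eq lines (pvASkip lines (i + 1)) true _
          · simp only [if_neg hEmpty]
            exact pvLoop_eq lines (i + 1) true _
  · rw [pvALoop, dif_neg h, List.drop_eq_nil_of_le (by omega)]
    rfl
termination_by lines.length - i
decreasing_by
  · omega
  · omega
  · omega
  · have := pvASkip_le lines (i + 1); omega
  · omega

-- ===== VERDICT (by name: the statement is the Claim_ definition above) =====
theorem fix_double_empty_lines_in_code_blocks_spec : Claim_equal_fix_double_empty_lines_in_code_blocks := by
  intro content _
  unfold Spec_fix_double_empty_lines_in_code_blocks
  unfold fix_double_empty_lines_in_code_blocks fix_double_empty_lines_in_code_blocks_alt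
  rw [pvLoop_eq, List.drop_zero]
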